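-- pv_equiv track=rewrite | github.com/Peder2911/advent_of_code | 2022/8/script.py | values_starting_from
-- ===== SOURCE A (Python) =====
-- def dims(mat):
--     return len(mat[0]), len(mat)
--
-- def values_starting_from(coords, mat):
--     xs,ys = dims(mat)
--     x_start, y_start = coords
--     coords = [
--             [(x,y_start) for x in range(x_start-1,-1,-1)],
--             [(x_start,y) for y in range(y_start+1,ys)],
--             [(x,y_start) for x in range(x_start+1,xs)],
--             [(x_start,y) for y in range(y_start-1,-1,-1)],
--         ]
--     return [[mat[x][y] for x,y in crds] for crds in coords]
-- ===== SOURCE B (Python) =====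
-- def values_starting_from(coords, mat):
--     x, y = coords
--     column = [r[y] for r in mat]
--     row = mat[x]
--     return [column[:max(x, 0)][::-1],
--             row[y + 1:],
--             column[x + 1:],
--             row[:max(y, 0)][::-1]]
-- ===== Notes on version B (the rewrite author's own statement) =====
-- stated objective: simpler
-- what changed: B extracts the coordinate's row and the column mat[*][y] once and returns reversed-prefix / suffix slices of them, instead of A's two-phase construction of four coordinate lists followed by per-coordinate mat[x][y] lookups.
-- intended difference: On square grids with an in-range coordinate component below -1, A returns rays assembled through Python's accidental negative-index wraparound (a right/down ray longer than the grid side, with wrapped values prepended), while B returns the plain row/column slices, the natural clipped rays for an out-of-grid start. — e.g. on values_starting_from((-2, 0), [[1, 2], [3, 4]]): A returns [[], [2], [3, 1, 3], []], B returns [[], [2], [3], []]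
-- outside the precondition, e.g. on values_starting_from((1, 0), [[7]]): A returns [[7], [], [], []], B raises IndexError
import Mathlib
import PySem

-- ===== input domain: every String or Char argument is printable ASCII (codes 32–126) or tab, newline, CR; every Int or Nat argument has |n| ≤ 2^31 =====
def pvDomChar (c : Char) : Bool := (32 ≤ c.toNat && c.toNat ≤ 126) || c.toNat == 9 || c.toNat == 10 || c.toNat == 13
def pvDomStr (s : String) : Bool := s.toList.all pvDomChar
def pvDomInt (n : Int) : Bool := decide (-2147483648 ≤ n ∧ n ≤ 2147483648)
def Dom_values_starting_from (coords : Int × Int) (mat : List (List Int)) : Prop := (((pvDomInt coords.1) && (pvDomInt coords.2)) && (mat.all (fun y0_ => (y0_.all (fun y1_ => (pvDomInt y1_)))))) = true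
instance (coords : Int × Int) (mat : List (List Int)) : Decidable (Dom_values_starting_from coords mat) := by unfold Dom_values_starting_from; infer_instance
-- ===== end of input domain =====

-- B replaces A's coordinate-list generation + per-coordinate lookups by row/column extraction and slicing (objective: simpler).


-- ===== PORT A =====
-- mat[x][y] is ported with pyGetD (exact under Pre_, which puts every used index in range)
def values_starting_from (coords : Int × Int) (mat : List (List Int)) : List (List Int) :=
  let xs : Int := (PySem.List.pyGetD mat 0 ([] : List Int)).length   -- len(mat[0]); mat = [] raises, excluded by Pre_
  let ys : Int := mat.length
  let x0 := coords.1
  let y0 := coords.2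
  let crds : List (List (Int × Int)) :=
    [ (PySem.List.pyRange (x0 - 1) (-1) (-1)).map (fun x => (x, y0)),
      (PySem.List.pyRange (y0 + 1) ys 1).map (fun y => (x0, y)),
      (PySem.List.pyRange (x0 + 1) xs 1).map (fun x => (x, y0)),
      (PySem.List.pyRange (y0 - 1) (-1) (-1)).map (fun y => (x0, y)) ]
  crds.map (fun c => c.map (fun p => PySem.List.pyGetD (PySem.List.pyGetD mat p.1 ([] : List Int)) p.2 0))

-- ===== PORT B =====
-- r[y], mat[x] ported with pyGetD (exact under Pre_); [::-1] is List.reverse (PySem.List.slice?_none_none_neg_one)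
def values_starting_from_alt (coords : Int × Int) (mat : List (List Int)) : List (List Int) :=
  let x := coords.1
  let y := coords.2
  let column := mat.map (fun r => PySem.List.pyGetD r y 0)
  let row := PySem.List.pyGetD mat x ([] : List Int)
  [ (PySem.List.slice column none (some (max x 0))).reverse,
    PySem.List.slice row (some (y + 1)) none,
    PySem.List.slice column (some (x + 1)) none,
    (PySem.List.slice row none (some (max y 0))).reverse ]

-- ===== PRECONDITION & SPEC =====
-- Pre_ is A's return domain restricted to square grids: on ragged grids and coordinates outside [-n, n)
-- A raises an IndexError for almost every coordinate (its row/column bounds are swapped), and B raises or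
-- returns a different slicing of the ragged rows on the few where A still returns.
def Pre_values_starting_from (coords : Int × Int) (mat : List (List Int)) : Prop :=
  mat ≠ [] ∧ (∀ r ∈ mat, r.length = mat.length) ∧
  -(mat.length : Int) ≤ coords.1 ∧ coords.1 < mat.length ∧
  -(mat.length : Int) ≤ coords.2 ∧ coords.2 < mat.length
instance (coords : Int × Int) (mat : List (List Int)) : Decidable (Pre_values_starting_from coords mat) := by
  unfold Pre_values_starting_from; infer_instance

def pvWitness_values_starting_from : (Int × Int) × List (List Int) := ((1, 0), [[1, 2], [3, 4]])

-- On a square grid with an in-range coordinate component below -1, A returns rays assembled through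
-- Python's accidental negative-index wraparound (a right/down ray longer than the grid side, wrapped
-- values prepended), while B returns the plain row/column slices, the natural clipped rays for an
-- out-of-grid start.
def D_values_starting_from (coords : Int × Int) (mat : List (List Int)) : Prop :=
  (∀ r ∈ mat, r.length = mat.length) ∧
  -(mat.length : Int) ≤ coords.1 ∧ coords.1 < mat.length ∧
  -(mat.length : Int) ≤ coords.2 ∧ coords.2 < mat.length ∧
  (coords.1 < -1 ∨ coords.2 < -1)
instance (coords : Int × Int) (mat : List (List Int)) : Decidable (D_values_starting_from coords mat) := by
  unfold D_values_starting_from; infer_instance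

def Spec_values_starting_from (coords : Int × Int) (mat : List (List Int)) (out : List (List Int)) : Prop := ¬ D_values_starting_from coords mat → out = values_starting_from_alt coords mat
instance (coords : Int × Int) (mat : List (List Int)) (out : List (List Int)) : Decidable (Spec_values_starting_from coords mat out) := by unfold Spec_values_starting_from; infer_instance

def pvDiffWitness_values_starting_from : (Int × Int) × List (List Int) := ((-2, 0), [[1, 2], [3, 4]])
def pvDiffWitnessOut_values_starting_from : (List (List Int)) × (List (List Int)) :=
  ([[], [2], [3, 1, 3], []], [[], [2], [3], []])

-- ===== CLAIM (what is proved, stated in full; the proofs are below) =====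
def Claim_unchanged_values_starting_from : Prop := ∀ (coords : Int × Int) (mat : List (List Int)), Dom_values_starting_from coords mat → Pre_values_starting_from coords mat → Spec_values_starting_from coords mat (values_starting_from coords mat)
def Claim_changed_values_starting_from : Prop := Dom_values_starting_from (pvDiffWitness_values_starting_from.1) (pvDiffWitness_values_starting_from.2) ∧ Pre_values_starting_from (pvDiffWitness_values_starting_from.1) (pvDiffWitness_values_starting_from.2) ∧ D_values_starting_from (pvDiffWitness_values_starting_from.1) (pvDiffWitness_values_starting_from.2) ∧ values_starting_from (pvDiffWitness_values_starting_from.1) (pvDiffWitness_values_starting_from.2) = pvDiffWitnessOut_values_starting_from.1 ∧ values_starting_from_alt (pvDiffWitness_values_starting_from.1) (pvDiffWitness_values_starting_from.2) = pvDiffWitnessOut_values_starting_from.2 ∧ pvDiffWitnessOut_values_starting_from.1 ≠ pvDiffWitnessOut_values_starting_from.2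

def Claim_exact_values_starting_from : Prop := ∀ (coords : Int × Int) (mat : List (List Int)), Dom_values_starting_from coords mat → Pre_values_starting_from coords mat → D_values_starting_from coords mat → values_starting_from coords mat ≠ values_starting_from_alt coords mat

-- ===== LEMMAS AND PROOFS =====


-- a prefix read off by getD at indices 0..m-1 is List.take
theorem map_getD_range_take {α : Type} (xs : List α) (d : α) (m : Nat) (h : m ≤ xs.length) :
    (List.range m).map (fun k => xs.getD k d) = xs.take m := by
  apply List.ext_getElem
  · simp [Nat.min_eq_left h]
  · intro i h1 h2
    simp at h1 h2 ⊢
    rw [List.getElem?_eq_getElem (by omega)]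
    rfl

-- the same prefix read off through Python indexing (as A's comprehensions produce it)
theorem range_pyGetD_take {α : Type} (xs : List α) (d : α) (m : Nat) (hm : m ≤ xs.length) :
    (List.range m).map (fun (k : Nat) => PySem.List.pyGetD xs (0 + (k : Int)) d) = xs.take m := by
  rw [← map_getD_range_take xs d m hm]
  apply List.map_congr_left
  intro k _
  simp [PySem.List.pyGetD_natCast]

-- ===== VERDICT (by name: the statement is the Claim_ definition above) =====
theorem values_starting_from_changed : Claim_changed_values_starting_from := by
  unfold Claim_changed_values_starting_from; decide

theorem values_starting_from_spec : Claim_unchanged_values_starting_from := by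
  intro coords mat _ hpre hnD
  obtain ⟨x, y⟩ := coords
  obtain ⟨hne, hsq, hxm, hx1, hym, hy1⟩ := hpre
  simp only at hxm hx1 hym hy1
  -- with Pre_, ¬D_ says both coordinate components are ≥ -1
  obtain ⟨hx0, hy0⟩ : -1 ≤ x ∧ -1 ≤ y := by
    unfold D_values_starting_from at hnD
    simp only [not_and, not_or, not_lt] at hnD
    simpa using hnD hsq hxm hx1 hym hy1
  -- len(mat[0]) = len(mat) on a square grid
  have hxs : ((PySem.List.pyGetD mat 0 ([] : List Int)).length : Int) = (mat.length : Int) := by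
    cases mat with
    | nil => exact absurd rfl hne
    | cons r t =>
      rw [PySem.List.pyGetD_zero_cons]
      exact_mod_cast hsq r (List.mem_cons_self ..)
  -- the coordinate's row has the grid's length
  have hrowlen : ((PySem.List.pyGetD mat x ([] : List Int)).length : Int) = (mat.length : Int) := by
    have hmem : PySem.List.pyGetD mat x ([] : List Int) ∈ mat :=
      PySem.List.pyGetD_mem mat ([] : List Int) (by unfold PySem.Raise.InRange; omega)
    exact_mod_cast hsq _ hmem
  have hmx : (max x 0).toNat = x.toNat := by omega
  have hmy : (max y 0).toNat = y.toNat := by omega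
  unfold values_starting_from values_starting_from_alt
  simp only [List.map_cons, List.map_nil, List.map_map, hxs, Function.comp_def]
  rw [PySem.List.slice_to _ (le_max_right x 0), PySem.List.slice_to _ (le_max_right y 0),
      PySem.List.slice_from _ (show (0:Int) ≤ y + 1 by omega),
      PySem.List.slice_from _ (show (0:Int) ≤ x + 1 by omega), hmx, hmy]
  simp only [List.cons.injEq, and_true]
  refine ⟨?_, ?_, ?_, ?_⟩
  -- left ray: reversed prefix of the column
  · rw [PySem.List.pyRange_neg_one_eq_reverse]
    norm_num
    rw [PySem.List.pyRange_one, List.map_map]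
    simp only [Function.comp_def, sub_zero]
    rw [show (fun k : Nat => PySem.List.pyGetD (PySem.List.pyGetD mat (0 + (k:Int)) ([]:List Int)) y 0)
          = (fun r => PySem.List.pyGetD r y 0) ∘ (fun k : Nat => PySem.List.pyGetD mat (0 + (k:Int)) ([]:List Int)) from rfl,
        ← List.map_map, range_pyGetD_take mat ([]:List Int) _ (by omega), List.map_take]
  -- down ray: suffix of the row
  · rw [show ((mat.length : Int)) = ((PySem.List.pyGetD mat x ([]:List Int)).length : Int) from hrowlen.symm,
        PySem.List.map_pyGetD_pyRange' _ _ (show (0:Int) ≤ y + 1 by omega)]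
  -- right ray: suffix of the column
  · rw [show (fun i : Int => PySem.List.pyGetD (PySem.List.pyGetD mat i ([]:List Int)) y 0)
          = (fun r => PySem.List.pyGetD r y 0) ∘ (fun i : Int => PySem.List.pyGetD mat i ([]:List Int)) from rfl,
        ← List.map_map, PySem.List.map_pyGetD_pyRange' _ _ (show (0:Int) ≤ x + 1 by omega), List.map_drop]
  -- up ray: reversed prefix of the row
  · rw [PySem.List.pyRange_neg_one_eq_reverse]
    norm_num
    rw [PySem.List.pyRange_one, List.map_map]
    simp only [Function.comp_def, sub_zero]
    rw [range_pyGetD_take _ 0 _ (by omega)]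

theorem values_starting_from_tight : Claim_exact_values_starting_from := by
  intro coords mat _ hpre hD heq
  obtain ⟨x, y⟩ := coords
  obtain ⟨hne, hsq, hxm, hx1, hym, hy1⟩ := hpre
  obtain ⟨-, -, -, -, -, hneg⟩ := hD
  simp only at hxm hx1 hym hy1 hneg
  have hxs : ((PySem.List.pyGetD mat 0 ([] : List Int)).length : Int) = (mat.length : Int) := by
    cases mat with
    | nil => exact absurd rfl hne
    | cons r t =>
      rw [PySem.List.pyGetD_zero_cons]
      exact_mod_cast hsq r (List.mem_cons_self ..)
  have hrowlen : ((PySem.List.pyGetD mat x ([] : List Int)).length : Int) = (mat.length : Int) := by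
    have hmem : PySem.List.pyGetD mat x ([] : List Int) ∈ mat :=
      PySem.List.pyGetD_mem mat ([] : List Int) (by unfold PySem.Raise.InRange; omega)
    exact_mod_cast hsq _ hmem
  simp only [values_starting_from, values_starting_from_alt, List.map_cons, List.map_nil, List.cons.injEq, and_true] at heq
  obtain ⟨-, h2, h3, -⟩ := heq
  rcases hneg with hx | hy
  · -- x < -1: A's right ray is longer than B's
    have h3l := congrArg List.length h3
    rw [PySem.List.slice_some_none] at h3l
    simp only [List.length_map, PySem.List.length_pyRange_one, List.length_drop, hxs] at h3l
    simp only [PySem.List.clampIdx] at h3l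
    omega
  · -- y < -1: A's down ray is longer than B's
    have h2l := congrArg List.length h2
    rw [PySem.List.slice_some_none] at h2l
    simp only [List.length_map, PySem.List.length_pyRange_one, List.length_drop] at h2l
    simp only [PySem.List.clampIdx] at h2l
    have hrl : (PySem.List.pyGetD mat x ([] : List Int)).length = mat.length := by exact_mod_cast hrowlen
    omega
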